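-- pv_equiv track=rewrite | github.com/hjkit/mbasic | src/ui/ui_helpers.py | delete_line_range
-- ===== SOURCE A (Python) =====
-- from typing import Dict, List, Tuple, Optional, Set
--
-- def delete_line_range(
--     lines: Dict[int, str],
--     start: int,
--     end: int
-- ) -> Dict[int, str]:
--     """Delete a range of lines from a program.
--
--     Args:
--         lines: Dictionary of line_number -> line_text
--         start: First line number to delete (inclusive)
--         end: Last line number to delete (inclusive)
--
--     Returns:
--         New dictionary with lines deleted
--
--     Example:
--         >>> lines = {10: "10 PRINT A", 20: "20 PRINT B", 30: "30 PRINT C"}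
--         >>> delete_line_range(lines, 10, 20)
--         {30: "30 PRINT C"}
--     """
--     new_lines = {}
--     for line_num, line_text in lines.items():
--         if not (start <= line_num <= end):
--             new_lines[line_num] = line_text
--     return new_lines
-- ===== SOURCE B (Python) =====
-- def _bisect_left(a, x):
--     """Leftmost insertion point of x in sorted list a (hand-written, CPython's algorithm)."""
--     lo, hi = 0, len(a)
--     while lo < hi:
--         mid = (lo + hi) // 2
--         if a[mid] < x:
--             lo = mid + 1
--         else:
--             hi = mid
--     return lo
--
--
-- def _bisect_right(a, x):
--     """Rightmost insertion point of x in sorted list a (hand-written, CPython's algorithm)."""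
--     lo, hi = 0, len(a)
--     while lo < hi:
--         mid = (lo + hi) // 2
--         if x < a[mid]:
--             hi = mid
--         else:
--             lo = mid + 1
--     return lo
--
--
-- def delete_line_range(lines, start, end):
--     """Sort the line numbers, binary-search the contiguous block lying in
--     [start, end], and delete exactly those keys from a copy of the input.
--
--     Different algorithm from a linear filter: after sorting, the doomed keys
--     form one contiguous slice found by two binary searches, so only the keys
--     actually being deleted are ever touched. The input dict is not mutated.
--     """
--     ks = sorted(lines)
--     lo = _bisect_left(ks, start)
--     hi = _bisect_right(ks, end)
--     result = dict(lines)
--     for k in ks[lo:hi]: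
--         del result[k]
--     return result
-- ===== Notes on version B (the rewrite author's own statement) =====
-- stated objective: alternative
-- what changed: B sorts the line numbers, locates the doomed keys as one contiguous block with two hand-written binary searches, and deletes exactly that slice of keys from a copy, instead of A's single linear pass that rebuilds the dict from the entries outside the range.
import Mathlib
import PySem

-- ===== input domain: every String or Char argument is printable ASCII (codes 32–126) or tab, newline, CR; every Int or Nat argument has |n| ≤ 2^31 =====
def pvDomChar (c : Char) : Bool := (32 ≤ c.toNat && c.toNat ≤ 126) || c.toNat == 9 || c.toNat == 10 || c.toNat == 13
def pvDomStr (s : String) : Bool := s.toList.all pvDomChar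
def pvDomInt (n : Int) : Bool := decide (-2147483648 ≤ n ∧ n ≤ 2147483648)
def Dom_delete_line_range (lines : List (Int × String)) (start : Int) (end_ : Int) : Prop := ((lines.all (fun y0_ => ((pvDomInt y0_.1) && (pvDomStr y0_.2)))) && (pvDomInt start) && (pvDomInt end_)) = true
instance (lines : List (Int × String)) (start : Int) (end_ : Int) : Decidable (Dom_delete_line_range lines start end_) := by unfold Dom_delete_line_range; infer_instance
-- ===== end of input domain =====

-- B sorts the line numbers, finds the in-range keys as one contiguous block by two binary searches, and deletes only that slice from a copy; A linearly rebuilds from the kept entries. Alternative algorithm, same results.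


-- ===== PORT A =====
-- A: new_lines = {}; for (k, v) in lines.items(): if not (start <= k <= end): new_lines[k] = v
def delete_line_range (lines : List (Int × String)) (start : Int) (end_ : Int) : List (Int × String) :=
  (lines.foldl
    (fun new_lines p =>
      if ¬ (start ≤ p.1 ∧ p.1 ≤ end_) then new_lines.insert p.1 p.2 else new_lines)
    (PySem.Dict.empty : PySem.Dict Int String)).items

-- ===== PORT B =====
-- B: ks = sorted(lines); lo = _bisect_left(ks, start); hi = _bisect_right(ks, end);
--    result = dict(lines); for k in ks[lo:hi]: del result[k]
-- Source B's hand-written _bisect_left/_bisect_right loops are LITERALLY the lo/hi halving loop of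
-- PySem.List.bisectLeft/bisectRight (lo < hi; mid = (lo+hi)//2; compare a[mid]; move lo or hi), so the
-- port uses those. ks[lo:hi] with 0 ≤ lo, hi Nats is exactly drop lo / take (hi-lo). 'del result[k]'
-- only ever sees keys k present in result, where it is Dict.erase.
def delete_line_range_alt (lines : List (Int × String)) (start : Int) (end_ : Int) : List (Int × String) :=
  let result : PySem.Dict Int String := PySem.Dict.ofList lines
  let ks : List Int := PySem.List.sorted result.keys (fun k => k) false
  let lo : Nat := PySem.List.bisectLeft ks start
  let hi : Nat := PySem.List.bisectRight ks end_
  (((ks.drop lo).take (hi - lo)).foldl (fun r k => r.erase k) result).items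

-- ===== PRECONDITION & SPEC =====
def Spec_delete_line_range (lines : List (Int × String)) (start : Int) (end_ : Int) (out : List (Int × String)) : Prop := out = delete_line_range_alt lines start end_
instance (lines : List (Int × String)) (start : Int) (end_ : Int) (out : List (Int × String)) : Decidable (Spec_delete_line_range lines start end_ out) := by unfold Spec_delete_line_range; infer_instance

-- ===== CLAIM (what is proved, stated in full; the proofs are below) =====
def Claim_equal_delete_line_range : Prop := ∀ (lines : List (Int × String)) (start : Int) (end_ : Int), Dom_delete_line_range lines start end_ → Spec_delete_line_range lines start end_ (delete_line_range lines start end_)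

-- ===== LEMMAS AND PROOFS =====

-- the entries that survive: key outside [start, end_]
def pvKeep (start end_ k : Int) : Bool := !(decide (start ≤ k ∧ k ≤ end_))

-- A's guarded insert loop is the plain insert loop over the kept entries
theorem foldA_eq_filter (start end_ : Int) :
    ∀ (l : List (Int × String)) (d : PySem.Dict Int String),
      l.foldl (fun nl p => if ¬ (start ≤ p.1 ∧ p.1 ≤ end_) then nl.insert p.1 p.2 else nl) d
      = (l.filter (fun p => pvKeep start end_ p.1)).foldl (fun nl p => nl.insert p.1 p.2) d := by
  intro l
  induction l with
  | nil => intro d; simp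
  | cons p t ih =>
    intro d
    rw [List.foldl_cons, List.filter_cons]
    by_cases h : start ≤ p.1 ∧ p.1 ≤ end_
    · rw [if_neg (not_not_intro h)]
      have hf : pvKeep start end_ p.1 = false := by simp [pvKeep, h]
      simp only [hf, Bool.false_eq_true, if_false]
      exact ih d
    · rw [if_pos h]
      have ht : pvKeep start end_ p.1 = true := by simp [pvKeep, h]
      simp only [ht, if_true, List.foldl_cons]
      exact ih (d.insert p.1 p.2)

-- membership test restricted to a key-predicate filter is unchanged when the key passes
theorem contains_filter_of_keep (Q : Int → Bool) (k : Int) (hk : Q k = true) :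
    ∀ (l : List (Int × String)),
      (l.filter (fun p => Q p.1)).any (fun p => p.1 == k) = l.any (fun p => p.1 == k) := by
  intro l
  induction l with
  | nil => simp
  | cons p t ih =>
    by_cases hp : p.1 = k
    · simp [hp, hk, List.any_cons, ih]
    · by_cases hq : Q p.1 = true <;> simp [hq, List.any_cons, hp, ih]

-- replacing the value at key k commutes with a key-only filter
theorem filter_map_replace (Q : Int → Bool) (k : Int) (v : String) :
    ∀ (l : List (Int × String)),
      (l.map (fun p => if p.1 == k then (k, v) else p)).filter (fun p => Q p.1)
      = (l.filter (fun p => Q p.1)).map (fun p => if p.1 == k then (k, v) else p) := by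
  intro l
  induction l with
  | nil => simp
  | cons p t ih =>
    by_cases hp : p.1 = k
    · by_cases hq : Q k = true <;>
        (simp [List.map_cons, hp, hq]) <;> simpa using ih
    · by_cases hq : Q p.1 = true <;>
        (simp [List.map_cons, hp, hq]) <;> simpa using ih

-- key-only filtering of the items commutes with an insert loop
theorem filter_foldl_insert (start end_ : Int) :
    ∀ (l : List (Int × String)) (d : PySem.Dict Int String),
      ((l.foldl (fun nl p => nl.insert p.1 p.2) d).items).filter (fun p => pvKeep start end_ p.1)
      = ((l.filter (fun p => pvKeep start end_ p.1)).foldl (fun nl p => nl.insert p.1 p.2)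
          (PySem.Dict.mk (d.items.filter (fun p => pvKeep start end_ p.1)))).items := by
  intro l
  induction l with
  | nil => intro d; simp
  | cons p t ih =>
    intro d
    simp only [List.foldl_cons, List.filter_cons]
    by_cases hk : pvKeep start end_ p.1 = true
    · rw [if_pos hk, List.foldl_cons, ih (d.insert p.1 p.2)]
      congr 2
      show PySem.Dict.mk ((d.insert p.1 p.2).items.filter _)
        = (PySem.Dict.mk (d.items.filter (fun q => pvKeep start end_ q.1))).insert p.1 p.2
      have hc : (PySem.Dict.mk (d.items.filter (fun q => pvKeep start end_ q.1))).contains p.1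
          = d.contains p.1 := by
        simpa [PySem.Dict.contains] using
          contains_filter_of_keep (pvKeep start end_) p.1 hk d.items
      by_cases hcont : d.contains p.1 = true
      · simp only [PySem.Dict.insert, hcont, hc, if_pos]
        exact congrArg PySem.Dict.mk
          (filter_map_replace (pvKeep start end_) p.1 p.2 d.items)
      · have hcont' : d.contains p.1 = false := by simpa using hcont
        simp only [PySem.Dict.insert, hc, hcont', Bool.false_eq_true, if_false]
        simp [List.filter_append, hk]
    · rw [if_neg hk, ih (d.insert p.1 p.2)]
      congr 2
      apply congrArg PySem.Dict.mk
      by_cases hcont : d.contains p.1 = true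
      · simp only [PySem.Dict.insert, hcont, if_pos]
        rw [filter_map_replace (pvKeep start end_) p.1 p.2 d.items]
        have : (d.items.filter (fun q => pvKeep start end_ q.1)).map
            (fun q => if q.1 == p.1 then (p.1, p.2) else q)
            = (d.items.filter (fun q => pvKeep start end_ q.1)).map id := by
          apply List.map_congr_left
          intro q hq
          have hqk : pvKeep start end_ q.1 = true := (List.mem_filter.mp hq).2
          have : ¬ (q.1 = p.1) := fun h => by rw [h] at hqk; exact absurd hqk (by simp [hk])
          simp [this]
        simpa using this
      · simp [PySem.Dict.insert, hcont, List.filter_append, hk]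

-- A's result is the original dict's items with the in-range keys filtered out
theorem A_eq_filter (lines : List (Int × String)) (start end_ : Int) :
    delete_line_range lines start end_
      = ((PySem.Dict.ofList lines).items).filter (fun p => pvKeep start end_ p.1) := by
  unfold delete_line_range
  rw [foldA_eq_filter]
  have := filter_foldl_insert start end_ lines (PySem.Dict.empty : PySem.Dict Int String)
  simp only [PySem.Dict.ofList, PySem.Dict.update] at *
  rw [this]
  simp [PySem.Dict.empty]

-- B's erase loop over a key list filters out exactly the listed keys
theorem foldErase_filter :
    ∀ (ks : List Int) (d : PySem.Dict Int String),
      (ks.foldl (fun r k => r.erase k) d).items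
      = d.items.filter (fun p => !(decide (p.1 ∈ ks))) := by
  intro ks
  induction ks with
  | nil => intro d; simp
  | cons k t ih =>
    intro d
    rw [List.foldl_cons, ih]
    show (d.items.filter (fun p => !p.1 == k)).filter _ = _
    rw [List.filter_filter]
    apply List.filter_congr
    intro p _
    by_cases hk : p.1 = k
    · simp [hk]
    · simp [hk]

-- membership in the slice ks[lo:hi] picked by the two binary searches ⟺ the key lies in [start, end_],
-- for any key of the sorted key list
theorem mem_slice_iff (ks : List Int) (hs : ks.Pairwise (· ≤ ·)) (start end_ k : Int) (hk : k ∈ ks) :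
    (k ∈ (ks.drop (PySem.List.bisectLeft ks start)).take
          (PySem.List.bisectRight ks end_ - PySem.List.bisectLeft ks start))
      ↔ (start ≤ k ∧ k ≤ end_) := by
  obtain ⟨hL1, hL2, hL3⟩ := PySem.List.bisectLeft_spec ks start hs
  obtain ⟨hR1, hR2, hR3⟩ := PySem.List.bisectRight_spec ks end_ hs
  set L := PySem.List.bisectLeft ks start with hLdef
  set R := PySem.List.bisectRight ks end_ with hRdef
  constructor
  · intro hmem
    obtain ⟨i, hi, hgi⟩ := List.mem_iff_getElem.mp hmem
    have hi2 : i < (ks.drop L).length := by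
      rw [List.length_take] at hi
      exact lt_of_lt_of_le hi (min_le_right _ _)
    have hi' : i < R - L := by
      rw [List.length_take] at hi
      exact lt_of_lt_of_le hi (min_le_left _ _)
    have hiL : L + i < ks.length := by
      rw [List.length_drop] at hi2; omega
    have hval : ks[L + i]'hiL = k := by
      rw [List.getElem_take, List.getElem_drop] at hgi
      exact hgi
    constructor
    · have := hL3 (L + i) hiL (Nat.le_add_right _ _)
      rwa [hval] at this
    · have hlt : L + i < R := by omega
      have := hR2 (L + i) hiL hlt
      rwa [hval] at this
  · rintro ⟨h1, h2⟩
    obtain ⟨j, hj, hgj⟩ := List.mem_iff_getElem.mp hk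
    have hjL : L ≤ j := by
      by_contra hc
      have := hL2 j hj (Nat.lt_of_not_le hc)
      rw [hgj] at this; omega
    have hjR : j < R := by
      by_contra hc
      have := hR3 j hj (Nat.le_of_not_lt hc)
      rw [hgj] at this; omega
    apply List.mem_iff_getElem.mpr
    have hlen1 : j - L < (ks.drop L).length := by simp [List.length_drop]; omega
    refine ⟨j - L, ?_, ?_⟩
    · rw [List.length_take]
      exact lt_min (by omega) hlen1
    · rw [List.getElem_take, List.getElem_drop]
      have : L + (j - L) = j := by omega
      simp only [this]
      exact hgj

-- ===== VERDICT (by name: the statement is the Claim_ definition above) =====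
theorem delete_line_range_spec : Claim_equal_delete_line_range := by
  intro lines start end_ _
  show delete_line_range lines start end_ = delete_line_range_alt lines start end_
  rw [A_eq_filter]
  unfold delete_line_range_alt
  simp only []
  rw [foldErase_filter]
  apply Eq.symm
  apply List.filter_congr
  intro p hp
  have hkey : p.1 ∈ PySem.List.sorted (PySem.Dict.ofList lines).keys (fun k => k) false := by
    rw [PySem.List.mem_sorted]
    exact List.mem_map_of_mem hp
  have hs : (PySem.List.sorted (PySem.Dict.ofList lines).keys (fun k => k) false).Pairwise (· ≤ ·) := by
    simpa using PySem.List.sorted_pairwise (PySem.Dict.ofList lines).keys (fun k => k)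
  have hiff := mem_slice_iff _ hs start end_ p.1 hkey
  simp [pvKeep, hiff]
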